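-- pv_equiv track=rewrite | github.com/mynvs/edo-graphs | src/edo_graphs.py | zeros_between_ones
-- ===== SOURCE A (Python) =====
-- CHARACTERS = '0123456789ABCDEFGHIJKLMNOPQRSTUVWXYZabcdefghijklmnopqrstuvwxyz'
--
-- def int_to_base62(num):
--     if num == 0:
--         return CHARACTERS[0]
--     result = ''
--     while num:
--         result = CHARACTERS[num % 62] + result
--         num //= 62
--     return result
--
-- def zeros_between_ones(bin_str):
--     zeros = []
--     zero_count = 0
--     first_one_encountered = False
--     for bit in bin_str + bin_str[0]:
--         if bit == '0':
--             zero_count += 1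
--         else:
--             if first_one_encountered or zero_count > 0:
--                 zeros.append(int_to_base62(zero_count))
--             first_one_encountered = True
--             zero_count = 0
--     return ''.join(zeros)
-- ===== SOURCE B (Python) =====
-- CHARACTERS = '0123456789ABCDEFGHIJKLMNOPQRSTUVWXYZabcdefghijklmnopqrstuvwxyz'
--
-- def int_to_base62(num):
--     if num == 0:
--         return CHARACTERS[0]
--     result = ''
--     while num:
--         result = CHARACTERS[num % 62] + result
--         num //= 62
--     return result
--
-- def zeros_between_ones(bin_str):
--     t = bin_str + bin_str[0]
--     idx = [i for i, c in enumerate(t) if c != '0']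
--     if not idx:
--         return ''
--     parts = [int_to_base62(idx[0])] if idx[0] > 0 else []
--     parts += [int_to_base62(j - i - 1) for i, j in zip(idx, idx[1:])]
--     return ''.join(parts)
-- ===== Notes on version B (the rewrite author's own statement) =====
-- stated objective: alternative
-- what changed: B replaces A's single stateful counter/flag scan by a two-stage decomposition: it first builds the table of positions of separator (nonzero) characters in bin_str + bin_str[0], then emits base62 gap sizes from pairwise position differences (emitting the leading gap only when positive).
import Mathlib
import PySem

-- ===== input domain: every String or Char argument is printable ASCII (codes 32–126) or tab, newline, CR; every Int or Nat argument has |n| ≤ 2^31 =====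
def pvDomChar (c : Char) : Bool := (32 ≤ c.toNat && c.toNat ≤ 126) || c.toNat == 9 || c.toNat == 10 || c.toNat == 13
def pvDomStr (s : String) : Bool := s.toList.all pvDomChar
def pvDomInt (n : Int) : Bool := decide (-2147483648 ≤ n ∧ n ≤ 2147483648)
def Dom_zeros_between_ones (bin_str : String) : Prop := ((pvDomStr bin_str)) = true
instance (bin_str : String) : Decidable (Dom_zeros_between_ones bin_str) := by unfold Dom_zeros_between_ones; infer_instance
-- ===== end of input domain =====

-- B rebuilds the circular zero-gap encoding by a two-stage decomposition (position table of nonzero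
-- chars, then pairwise differences) instead of A's one-pass counter/flag scan; objective: alternative.

-- shared helper: int_to_base62 (exact for the nonnegative arguments that occur here)
def pvCHARACTERS : List Char := "0123456789ABCDEFGHIJKLMNOPQRSTUVWXYZabcdefghijklmnopqrstuvwxyz".toList

def pvB62go (n : Nat) : List Char :=
  if h : n = 0 then [] else pvB62go (n / 62) ++ [pvCHARACTERS.getD (n % 62) '0']
decreasing_by exact Nat.div_lt_self (Nat.pos_of_ne_zero h) (by norm_num)

def int_to_base62 (num : Int) : List Char :=
  if num = 0 then ['0'] else pvB62go num.toNat

-- ===== PORT A =====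
-- loop body of A's for-loop: state = (zeros, zero_count, first_one_encountered)
def pvStepA (s : List (List Char) × Int × Bool) (bit : Char) : List (List Char) × Int × Bool :=
  if bit = '0' then (s.1, s.2.1 + 1, s.2.2)
  else ((if s.2.2 || decide (s.2.1 > 0) then s.1 ++ [int_to_base62 s.2.1] else s.1), (0 : Int), true)

def zeros_between_ones (bin_str : String) : String :=
  match PySem.Str.pyGet? bin_str 0 with
  | none => ""  -- bin_str[0] raises IndexError on the empty string; excluded by Pre_
  | some c =>
    String.ofList (((bin_str.toList ++ [c]).foldl pvStepA ([], 0, false)).1.flatten)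

-- ===== PORT B =====
def zeros_between_ones_alt (bin_str : String) : String :=
  match PySem.Str.pyGet? bin_str 0 with
  | none => ""  -- bin_str[0] raises IndexError on the empty string; excluded by Pre_
  | some c =>
    let t := bin_str.toList ++ [c]
    let idx := ((PySem.List.enumerate t).filter (fun p => p.2 != '0')).map (·.1)
    match idx with
    | [] => ""
    | i0 :: rest =>
      String.ofList (((if i0 > 0 then [int_to_base62 i0] else []) ++
        (List.zip (i0 :: rest) rest).map (fun p => int_to_base62 (p.2 - p.1 - 1))).flatten)

-- ===== PRECONDITION & SPEC =====
-- Pre_ excludes only the empty string, on which A raises IndexError (bin_str[0]); B raises there too.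
def Pre_zeros_between_ones (bin_str : String) : Prop := bin_str ≠ ""
instance (bin_str : String) : Decidable (Pre_zeros_between_ones bin_str) := by
  unfold Pre_zeros_between_ones; infer_instance

def pvWitness_zeros_between_ones : String := "10"

def Spec_zeros_between_ones (bin_str : String) (out : String) : Prop := out = zeros_between_ones_alt bin_str
instance (bin_str : String) (out : String) : Decidable (Spec_zeros_between_ones bin_str out) := by unfold Spec_zeros_between_ones; infer_instance

-- ===== CLAIM (what is proved, stated in full; the proofs are below) =====
def Claim_equal_zeros_between_ones : Prop := ∀ (bin_str : String), Dom_zeros_between_ones bin_str → Pre_zeros_between_ones bin_str → Spec_zeros_between_ones bin_str (zeros_between_ones bin_str)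

-- ===== LEMMAS AND PROOFS =====

-- the emitted gap pieces of A's scan, as a structural recursion over the char list
def pvGaps : List Char → Int → Bool → List (List Char)
  | [], _, _ => []
  | ch :: r, c, f =>
    if ch = '0' then pvGaps r (c + 1) f
    else (if f || decide (c > 0) then [int_to_base62 c] else []) ++ pvGaps r 0 true

-- positions (offset by n) of the nonzero characters
def pvIdx : List Char → Int → List Int
  | [], _ => []
  | ch :: r, n => if ch = '0' then pvIdx r (n + 1) else n :: pvIdx r (n + 1)

theorem pvFoldA (l : List Char) (z : List (List Char)) (c : Int) (f : Bool) :
    (l.foldl pvStepA (z, c, f)).1 = z ++ pvGaps l c f := by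
  induction l generalizing z c f with
  | nil => simp [pvGaps]
  | cons ch r ih =>
    by_cases h : ch = '0'
    · simp [List.foldl, pvStepA, pvGaps, h, ih]
    · simp only [List.foldl, pvStepA, pvGaps, if_neg h, ih]
      split <;> simp

theorem pvEnumIdx (l : List Char) (n : Int) :
    ((PySem.List.enumerate l n).filter (fun p => p.2 != '0')).map (·.1) = pvIdx l n := by
  induction l generalizing n with
  | nil => simp [PySem.List.enumerate_nil, pvIdx]
  | cons ch r ih =>
    rw [PySem.List.enumerate_cons]
    by_cases h : ch = '0' <;> simp [pvIdx, h, ih]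

theorem pvGapsIdx (l : List Char) (c n : Int) (f : Bool) :
    pvGaps l c f =
      (match pvIdx l n with
       | [] => []
       | i0 :: rest =>
         (if f || decide (c + (i0 - n) > 0) then [int_to_base62 (c + (i0 - n))] else []) ++
           (List.zip (i0 :: rest) rest).map (fun p => int_to_base62 (p.2 - p.1 - 1))) := by
  induction l generalizing c n f with
  | nil => simp [pvGaps, pvIdx]
  | cons ch r ih =>
    by_cases h : ch = '0'
    · simp only [pvGaps, pvIdx, if_pos h]
      rw [ih (c + 1) (n + 1) f]
      cases hp : pvIdx r (n + 1) with
      | nil => simp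
      | cons i0 rest =>
        have e : c + 1 + (i0 - (n + 1)) = c + (i0 - n) := by ring
        simp only [e]
    · simp only [pvGaps, pvIdx, if_neg h]
      rw [ih 0 (n + 1) true]
      cases hp : pvIdx r (n + 1) with
      | nil => simp
      | cons j0 r2 =>
        have e1 : (0 : Int) + (j0 - (n + 1)) = j0 - n - 1 := by ring
        have e2 : c + (n - n) = c := by ring
        simp only [e1, e2, List.zip, List.zipWith, List.map, Bool.true_or, if_pos]
        simp

-- ===== VERDICT (by name: the statement is the Claim_ definition above) =====
theorem zeros_between_ones_spec : Claim_equal_zeros_between_ones := by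
  unfold Claim_equal_zeros_between_ones Spec_zeros_between_ones
  intro s _ _
  unfold zeros_between_ones zeros_between_ones_alt
  cases hg : PySem.Str.pyGet? s 0 with
  | none => rfl
  | some c =>
    simp only
    rw [pvFoldA, List.nil_append, pvEnumIdx, pvGapsIdx (n := 0)]
    cases hp : pvIdx (s.toList ++ [c]) 0 with
    | nil => rfl
    | cons i0 rest =>
      have e : (0 : Int) + (i0 - 0) = i0 := by ring
      simp only [e, Bool.false_or, decide_eq_true_eq]
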